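-- pv_equiv track=rewrite | github.com/ajylee/cryptopals-challenges | set2-challenge16.py | edit_bits
-- ===== SOURCE A (Python) =====
-- def flip_least_bit(char):
--     num = ord(char)
--     return chr((~num & 1) + (~1 & num))
--
-- def edit_bits(strn):
--     chars = list(strn)
--
--     to_flip = [';admin=true'.index(c) for c in ';=']
--
--     return ''.join(
--         flip_least_bit(cc)
--         if ii in to_flip
--         else cc
--         for ii, cc in enumerate(strn))
-- ===== SOURCE B (Python) =====
-- def flip_least_bit(char):
--     num = ord(char)
--     return chr((~num & 1) + (~1 & num))
--
-- def edit_bits(strn):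
--     def patch(s, i):
--         if i < len(s):
--             return s[:i] + flip_least_bit(s[i]) + s[i+1:]
--         return s
--     return patch(patch(strn, ';admin=true'.index(';')), ';admin=true'.index('='))
-- ===== Notes on version B (the rewrite author's own statement) =====
-- stated objective: faster
-- what changed: B rebuilds the string by slice concatenation s[:i] + flipped + s[i+1:] at each of the two computed indices (length-guarded), instead of A's generator that enumerates every character and tests its index for membership in to_flip.
import Mathlib
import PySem

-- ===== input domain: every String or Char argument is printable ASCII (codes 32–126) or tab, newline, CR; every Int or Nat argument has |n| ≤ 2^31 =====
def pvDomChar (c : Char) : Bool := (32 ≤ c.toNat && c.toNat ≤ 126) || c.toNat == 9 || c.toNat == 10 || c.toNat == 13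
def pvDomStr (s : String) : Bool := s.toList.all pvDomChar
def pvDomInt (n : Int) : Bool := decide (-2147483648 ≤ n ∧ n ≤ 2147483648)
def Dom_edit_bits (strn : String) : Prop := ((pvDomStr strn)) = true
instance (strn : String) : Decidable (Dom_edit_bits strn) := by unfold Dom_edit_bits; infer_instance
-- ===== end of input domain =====

-- B rebuilds the string by slice concatenation around each of the two computed indices
-- instead of A's per-character membership scan; objective: simpler.

-- ===== PORT A =====
def flip_least_bit (char : Char) : Char :=
  let num : Int := char.toNat
  Char.ofNat ((PySem.Int.band (Int.not num) 1 + PySem.Int.band (Int.not 1) num)).toNat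

def edit_bits (strn : String) : String :=
  let _chars := strn.toList
  -- both ';' and '=' occur in ';admin=true', so .index never raises; .getD 0 is never the default branch
  let to_flip : List Int :=
    (";=".toList).map (fun c => ((PySem.List.index? ";admin=true".toList c).getD 0 : Nat))
  String.ofList ((PySem.List.enumerate strn.toList 0).map
    (fun p => if p.1 ∈ to_flip then flip_least_bit p.2 else p.2))

-- ===== PORT B =====
-- patch(s, i): s[:i] + flip_least_bit(s[i]) + s[i+1:] when i < len(s), else s
def pvPatch (s : List Char) (i : Int) : List Char :=
  if i < PySem.List.len s then
    PySem.List.slice s none (some i)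
      ++ [flip_least_bit (PySem.List.pyGetD s i ' ')]
      ++ PySem.List.slice s (some (i + 1)) none
  else s

def edit_bits_alt (strn : String) : String :=
  let i1 : Int := ((PySem.List.index? ";admin=true".toList ';').getD 0 : Nat)
  let i2 : Int := ((PySem.List.index? ";admin=true".toList '=').getD 0 : Nat)
  String.ofList (pvPatch (pvPatch strn.toList i1) i2)

-- ===== PRECONDITION & SPEC =====
def Spec_edit_bits (strn : String) (out : String) : Prop := out = edit_bits_alt strn
instance (strn : String) (out : String) : Decidable (Spec_edit_bits strn out) := by unfold Spec_edit_bits; infer_instance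

-- ===== CLAIM (what is proved, stated in full; the proofs are below) =====
def Claim_equal_edit_bits : Prop := ∀ (strn : String), Dom_edit_bits strn → Spec_edit_bits strn (edit_bits strn)

-- ===== LEMMAS AND PROOFS =====

lemma pvPatch_natCast (s : List Char) (n : Nat) :
    pvPatch s (n : Int) =
      if h : n < s.length then s.set n (flip_least_bit s[n]) else s := by
  unfold pvPatch
  by_cases h : n < s.length
  · have hcast : ((n : Int) + 1) = (((n + 1 : Nat) : Int)) := by push_cast; omega
    rw [if_pos (by simp [PySem.List.len_eq]; omega), dif_pos h, hcast,
      PySem.List.slice_to_natCast, PySem.List.slice_from_natCast,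
      List.set_eq_take_cons_drop _ h, PySem.List.pyGetD_natCast,
      List.getD_eq_getElem _ _ h]
    simp
  · rw [if_neg (by simp [PySem.List.len_eq]; omega), dif_neg h]

lemma edit_bits_eq_list (l : List Char) :
    (PySem.List.enumerate l 0).map
      (fun p => if p.1 ∈ [(0 : Int), 6] then flip_least_bit p.2 else p.2)
    = pvPatch (pvPatch l ((0 : Nat) : Int)) ((6 : Nat) : Int) := by
  simp only [pvPatch_natCast]
  by_cases h0 : (0 : Nat) < l.length
  · rw [dif_pos h0]
    by_cases h6 : (6 : Nat) < l.length
    · rw [dif_pos (by simpa using h6)]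
      apply List.ext_getElem
      · simp
      · intro k h1 h2
        have hl1 : k < l.length := by simpa using h1
        simp only [List.getElem_map, PySem.List.getElem_enumerate,
          List.getElem_set, List.mem_cons, List.not_mem_nil, or_false]
        rcases eq_or_ne k 0 with rfl | hk0
        · simp
        · rcases eq_or_ne k 6 with rfl | hk6
          · simp
          · rw [if_neg (by omega), if_neg (by omega), if_neg (by omega)]
    · rw [dif_neg (by simpa using h6)]
      apply List.ext_getElem
      · simp
      · intro k h1 h2
        have hl1 : k < l.length := by simpa using h1
        simp only [List.getElem_map, PySem.List.getElem_enumerate,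
          List.getElem_set, List.mem_cons, List.not_mem_nil, or_false]
        rcases eq_or_ne k 0 with rfl | hk0
        · simp
        · rw [if_neg (by omega), if_neg (by omega)]
  · have : l = [] := by cases l <;> simp_all
    subst this
    simp [PySem.List.enumerate]

-- ===== VERDICT (by name: the statement is the Claim_ definition above) =====
theorem edit_bits_spec : Claim_equal_edit_bits := by
  intro strn _
  show edit_bits strn = edit_bits_alt strn
  unfold edit_bits edit_bits_alt
  have hflip : ((";=".toList).map
      (fun c => (((PySem.List.index? ";admin=true".toList c).getD 0 : Nat) : Int)))
      = [(0 : Int), 6] := by decide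
  have h1 : (((PySem.List.index? ";admin=true".toList ';').getD 0 : Nat) : Int) = ((0 : Nat) : Int) := by decide
  have h2 : (((PySem.List.index? ";admin=true".toList '=').getD 0 : Nat) : Int) = ((6 : Nat) : Int) := by decide
  rw [hflip, h1, h2]
  exact congrArg String.ofList (edit_bits_eq_list strn.toList)
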